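-- pv_equiv track=rewrite | github.com/NewGen2022/shell-python | parser.py | parse_pipeline
-- ===== SOURCE A (Python) =====
-- def parse_pipeline(input):
--     pipeline = []
--     current = []
--
--     for token in input:
--         if token == "|":
--             if current:
--                 pipeline.append(current)
--                 current = []
--         else:
--             current.append(token)
--
--     if current:
--         pipeline.append(current)
--
--     return pipeline
-- ===== SOURCE B (Python) =====
-- def _span_nonsep(tokens):
--     """Longest prefix of tokens without '|', and the remainder."""
--     k = 0
--     while k < len(tokens) and tokens[k] != "|":
--         k += 1
--     return tokens[:k], tokens[k:]
--
--
-- def parse_pipeline(input):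
--     out = []
--     rest = input
--     while rest:
--         if rest[0] == "|":
--             rest = rest[1:]
--         else:
--             seg, rest = _span_nonsep(rest)
--             out.append(seg)
--     return out
-- ===== Notes on version B (the rewrite author's own statement) =====
-- stated objective: alternative
-- what changed: Replaced A's accumulator-and-flush loop (building `current` token by token and flushing it at each '|') by a span-based scanner that skips separators and cuts out each maximal run of non-'|' tokens as a whole slice.
import Mathlib
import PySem

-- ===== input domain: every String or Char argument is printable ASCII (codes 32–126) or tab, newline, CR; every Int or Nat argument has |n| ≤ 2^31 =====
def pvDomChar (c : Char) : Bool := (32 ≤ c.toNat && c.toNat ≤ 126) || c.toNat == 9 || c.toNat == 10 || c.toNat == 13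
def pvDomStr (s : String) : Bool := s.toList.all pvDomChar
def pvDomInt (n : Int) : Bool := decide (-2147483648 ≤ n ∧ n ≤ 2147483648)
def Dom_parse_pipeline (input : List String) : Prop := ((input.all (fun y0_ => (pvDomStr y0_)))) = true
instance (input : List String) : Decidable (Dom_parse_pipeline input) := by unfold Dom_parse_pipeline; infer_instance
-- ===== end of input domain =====

-- B replaces A's accumulator-and-flush loop by a span-based scanner (skip '|', cut a
-- maximal non-'|' run at once); alternative decomposition, no speed claim.

-- ===== PORT A =====
-- the loop body: flush `current` on '|', otherwise append the token
def ppStep (s : List (List String) × List String) (token : String) :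
    List (List String) × List String :=
  if token = "|" then
    if s.2 ≠ [] then (s.1 ++ [s.2], []) else s
  else (s.1, s.2 ++ [token])

def parse_pipeline (input : List String) : List (List String) :=
  let s := input.foldl ppStep ([], [])
  if s.2 ≠ [] then s.1 ++ [s.2] else s.1

-- ===== PORT B =====
-- port of _span_nonsep's index loop as structural recursion over the list
def ppSpanNonsep : List String → List String × List String
  | [] => ([], [])
  | t :: ts =>
    if t = "|" then ([], t :: ts)
    else
      let p := ppSpanNonsep ts
      (t :: p.1, p.2)

-- needed by the port's termination proof
theorem ppSpanNonsep_snd_le (l : List String) : (ppSpanNonsep l).2.length ≤ l.length := by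
  induction l with
  | nil => simp [ppSpanNonsep]
  | cons t ts ih =>
    simp only [ppSpanNonsep]
    split
    · simp
    · simpa using Nat.le_succ_of_le ih

-- the `while rest:` loop of Source B, with `out` as accumulator; when the head is not '|'
-- the call `_span_nonsep(rest)` is written with its first step unfolded (head kept, span of tail)
def ppAltLoop (out : List (List String)) : List String → List (List String)
  | [] => out
  | r :: rest' =>
    if r = "|" then ppAltLoop out rest'
    else ppAltLoop (out ++ [r :: (ppSpanNonsep rest').1]) (ppSpanNonsep rest').2
termination_by l => l.length
decreasing_by
  · simp
  · exact Nat.lt_succ_of_le (ppSpanNonsep_snd_le rest')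

def parse_pipeline_alt (input : List String) : List (List String) :=
  ppAltLoop [] input

-- ===== PRECONDITION & SPEC =====
def Spec_parse_pipeline (input : List String) (out : List (List String)) : Prop := out = parse_pipeline_alt input
instance (input : List String) (out : List (List String)) : Decidable (Spec_parse_pipeline input out) := by unfold Spec_parse_pipeline; infer_instance

-- ===== CLAIM (what is proved, stated in full; the proofs are below) =====
def Claim_equal_parse_pipeline : Prop := ∀ (input : List String), Dom_parse_pipeline input → Spec_parse_pipeline input (parse_pipeline input)

-- ===== LEMMAS AND PROOFS =====

-- span over a separator-free prefix passes through it
theorem ppSpanNonsep_append (cs r : List String) (h : ∀ t ∈ cs, t ≠ "|") :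
    ppSpanNonsep (cs ++ r) = (cs ++ (ppSpanNonsep r).1, (ppSpanNonsep r).2) := by
  induction cs with
  | nil => simp
  | cons c cs ih =>
    have hc : c ≠ "|" := h c (by simp)
    simp only [List.cons_append, ppSpanNonsep, if_neg hc,
      ih (fun t ht => h t (by simp [ht]))]

-- main invariant: A's loop from state (out, current) equals B's loop on current ++ input,
-- provided current contains no separator
theorem ppMain (input : List String) :
    ∀ (out : List (List String)) (current : List String), (∀ t ∈ current, t ≠ "|") →
      (let s := input.foldl ppStep (out, current);
       if s.2 ≠ [] then s.1 ++ [s.2] else s.1) = ppAltLoop out (current ++ input) := by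
  induction input with
  | nil =>
    intro out current h
    cases current with
    | nil => simp [ppAltLoop]
    | cons c cs =>
      have hc : c ≠ "|" := h c (by simp)
      have hcs : ppSpanNonsep cs = (cs, []) := by
        have := ppSpanNonsep_append cs [] (fun t ht => h t (by simp [ht]))
        simpa [ppSpanNonsep] using this
      simp [ppAltLoop, if_neg hc, hcs]
  | cons x xs ih =>
    intro out current h
    by_cases hx : x = "|"
    · subst hx
      cases current with
      | nil =>
        have := ih out [] (by simp)
        simpa [ppStep, ppAltLoop] using this
      | cons c cs =>
        have hc : c ≠ "|" := h c (by simp)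
        have hspan : ppSpanNonsep (cs ++ "|" :: xs) = (cs, "|" :: xs) := by
          have := ppSpanNonsep_append cs ("|" :: xs) (fun t ht => h t (by simp [ht]))
          simpa [ppSpanNonsep] using this
        have := ih (out ++ [c :: cs]) [] (by simp)
        simp only [List.foldl_cons, ppStep] at *
        simp only [List.cons_append, ppAltLoop, if_neg hc, hspan]
        simpa [ppAltLoop] using this
    · have hall : ∀ t ∈ current ++ [x], t ≠ "|" := by
        intro t ht
        rcases List.mem_append.mp ht with h1 | h1
        · exact h t h1
        · simp at h1; simpa [h1] using hx
      have := ih out (current ++ [x]) hall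
      simp only [List.foldl_cons, ppStep, if_neg hx] at *
      simpa [List.append_assoc] using this

-- ===== VERDICT (by name: the statement is the Claim_ definition above) =====
theorem parse_pipeline_spec : Claim_equal_parse_pipeline := by
  intro input _
  unfold Spec_parse_pipeline parse_pipeline parse_pipeline_alt
  simpa using ppMain input [] [] (by simp)
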